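-- pv_equiv track=rewrite | github.com/daihuasheng/build-perf-monitor | src/mymonitor/runner/main.py | _format_category_stats
-- ===== SOURCE A (Python) =====
-- from typing import Any, Dict, List, Optional, Set, Tuple
--
-- def _format_category_stats(category_peak_sum: Dict[str, int],
--                           category_pid_set: Dict[str, Set[str]],
--                           category_stats: Dict[str, Dict[str, Any]] = None) -> str:
--     """
--     Format category statistics for summary log with major/minor category grouping.
--
--     Args:
--         category_peak_sum: Dictionary mapping category to peak memory
--         category_pid_set: Dictionary mapping category to set of PIDs
--         category_stats: Dictionary mapping category to detailed statistics
--
--     Returns: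
--         Formatted string with category statistics
--     """
--     if not category_peak_sum:
--         return "No category data available.\n"
--
--     # Group by major category
--     major_categories: Dict[str, Dict[str, Any]] = {}
--
--     for category, peak_memory in category_peak_sum.items():
--         if ':' in category:
--             major_cat, minor_cat = category.split(':', 1)
--         else:
--             major_cat = category
--             minor_cat = 'Unknown'
--
--         # Initialize major category if not exists
--         if major_cat not in major_categories:
--             major_categories[major_cat] = {
--                 'minor_categories': {},
--                 'total_memory': 0,
--                 'total_pids': set()
--             }
--
--         # Add to minor categories
--         individual_peak = 0
--         if category_stats and category in category_stats:
--             individual_peak = category_stats[category].get('individual_peak_memory_kb', peak_memory)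
--         else:
--             individual_peak = peak_memory  # Fallback to total peak if no individual data
--
--         major_categories[major_cat]['minor_categories'][minor_cat] = {
--             'peak_memory': peak_memory,  # Total peak for this category
--             'individual_peak_memory': individual_peak,  # Peak of single process in this category
--             'pid_count': len(category_pid_set.get(category, set()))
--         }
--
--         # Update major category totals
--         major_categories[major_cat]['total_memory'] += peak_memory
--         major_categories[major_cat]['total_pids'].update(category_pid_set.get(category, set()))
--
--     # Sort major categories by name
--     sorted_major_cats = sorted(major_categories.keys())
--
--     # Format output
--     output_lines = []
--
--     for major_cat in sorted_major_cats:
--         major_data = major_categories[major_cat]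
--
--         # Major category header
--         output_lines.append(f"\n{major_cat}:")
--         output_lines.append(f"  Total Peak Memory: {major_data['total_memory']} KB "
--                            f"({len(major_data['total_pids'])} total pids)")
--
--         # Sort minor categories by peak memory (descending)
--         sorted_minor_cats = sorted(
--             major_data['minor_categories'].items(),
--             key=lambda x: x[1]['peak_memory'],
--             reverse=True
--         )
--
--         # Minor categories
--         for minor_cat, minor_data in sorted_minor_cats:
--             output_lines.append(
--                 f"    {minor_cat}: {minor_data['peak_memory']} KB (total, {minor_data['pid_count']} pids), "
--                 f"single process peak: {minor_data['individual_peak_memory']} KB"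
--             )
--
--     return '\n'.join(output_lines)
-- ===== SOURCE B (Python) =====
-- def _format_category_stats(category_peak_sum, category_pid_set, category_stats=None):
--     if not category_peak_sum:
--         return "No category data available.\n"
--
--     # Flatten once into (major, minor, category, peak) entries.
--     entries = []
--     for cat, peak in category_peak_sum.items():
--         if ':' in cat:
--             major, minor = cat.split(':', 1)
--         else:
--             major, minor = cat, 'Unknown'
--         entries.append((major, minor, cat, peak))
--
--     # Selection-by-minimum: repeatedly extract the alphabetically smallest
--     # remaining major and process its entries; no grouping dict, no key sort.
--     lines = []
--     rest = entries
--     while rest: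
--         m = min(e[0] for e in rest)
--         block = [e for e in rest if e[0] == m]
--         rest = [e for e in rest if e[0] != m]
--         total = 0
--         pids = set()
--         minors = {}
--         for _, minor, cat, peak in block:
--             cat_pids = category_pid_set.get(cat, set())
--             total += peak
--             pids.update(cat_pids)
--             if category_stats and cat in category_stats:
--                 ind = category_stats[cat].get('individual_peak_memory_kb', peak)
--             else:
--                 ind = peak
--             minors[minor] = (peak, ind, len(cat_pids))
--         lines.append(f"\n{m}:")
--         lines.append(f"  Total Peak Memory: {total} KB ({len(pids)} total pids)")
--         for minor, (peak, ind, pc) in sorted(minors.items(), key=lambda kv: kv[1][0], reverse=True):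
--             lines.append(
--                 f"    {minor}: {peak} KB (total, {pc} pids), single process peak: {ind} KB"
--             )
--     return '\n'.join(lines)
-- ===== Notes on version B (the rewrite author's own statement) =====
-- stated objective: alternative
-- what changed: Replaces A's hash-grouping (a major_categories dict of nested records built in one pass, then a sort of its keys) with selection-by-minimum over a flat entry list: B never builds a grouping dict or sorts majors, it repeatedly extracts the alphabetically smallest remaining major with min() and partitions the list, aggregating each extracted block on the spot.
import Mathlib
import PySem

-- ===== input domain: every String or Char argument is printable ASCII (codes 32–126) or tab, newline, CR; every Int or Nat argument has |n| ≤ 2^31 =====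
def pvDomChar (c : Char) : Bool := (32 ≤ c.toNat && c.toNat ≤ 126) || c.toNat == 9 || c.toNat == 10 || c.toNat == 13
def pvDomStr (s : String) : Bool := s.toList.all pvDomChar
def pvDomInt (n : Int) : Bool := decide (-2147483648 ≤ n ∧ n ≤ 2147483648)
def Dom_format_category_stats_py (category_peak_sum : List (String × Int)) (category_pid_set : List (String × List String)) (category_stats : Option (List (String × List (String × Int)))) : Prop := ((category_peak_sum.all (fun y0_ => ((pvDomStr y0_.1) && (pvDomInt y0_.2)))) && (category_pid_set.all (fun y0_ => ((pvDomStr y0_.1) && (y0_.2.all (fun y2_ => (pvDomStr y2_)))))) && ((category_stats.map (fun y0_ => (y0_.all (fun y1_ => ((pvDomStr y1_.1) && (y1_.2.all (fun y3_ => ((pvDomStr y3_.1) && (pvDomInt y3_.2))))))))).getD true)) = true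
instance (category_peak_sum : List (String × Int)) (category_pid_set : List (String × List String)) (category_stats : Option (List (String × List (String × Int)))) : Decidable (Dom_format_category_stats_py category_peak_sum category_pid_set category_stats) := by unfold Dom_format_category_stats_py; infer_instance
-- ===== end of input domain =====

-- B replaces A's hash-grouping dict + key sort by selection-by-minimum: it repeatedly extracts the
-- alphabetically smallest remaining major and its entries from a flat entry list; same return value.

-- ===== PORT A =====
-- the accumulated record for one major category: (minor_categories, total_memory, total_pids)
abbrev FcsRec := PySem.Dict String (Int × Int × Int) × Int × PySem.Set String

def fcsRec0 : FcsRec := (PySem.Dict.empty, 0, PySem.Set.empty)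

-- category.split(':', 1) when ':' in category, else (category, 'Unknown')
def fcsASplit (category : String) : String × String :=
  if PySem.Str.isIn ":" category then
    let parts := (PySem.Str.splitMax? category ":" 1).getD []
    (parts.getD 0 "", parts.getD 1 "")
  else (category, "Unknown")

-- individual_peak: category_stats[category].get('individual_peak_memory_kb', peak) under A's truthiness test
def fcsAIndiv (stats : Option (PySem.Dict String (PySem.Dict String Int))) (category : String) (peak : Int) : Int :=
  match stats with
  | none => peak
  | some st =>
      if st.size != 0 && st.contains category then
        (st.getD category PySem.Dict.empty).getD "individual_peak_memory_kb" peak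
      else peak

-- the three field updates A performs on the major's record for entry e = (category, peak_memory)
def fcsAUpd (pidsets : PySem.Dict String (PySem.Set String)) (stats : Option (PySem.Dict String (PySem.Dict String Int))) (r : FcsRec) (e : String × Int) : FcsRec :=
  (r.1.insert (fcsASplit e.1).2 (e.2, fcsAIndiv stats e.1 e.2, PySem.Set.len (pidsets.getD e.1 PySem.Set.empty)),
   r.2.1 + e.2,
   PySem.Set.update r.2.2 (pidsets.getD e.1 PySem.Set.empty))

-- one iteration of A's grouping loop (conditional init of the major, then the in-place updates)
def fcsAStep (pidsets : PySem.Dict String (PySem.Set String)) (stats : Option (PySem.Dict String (PySem.Dict String Int))) (d : PySem.Dict String FcsRec) (e : String × Int) : PySem.Dict String FcsRec :=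
  let major := (fcsASplit e.1).1
  let d1 := if d.contains major then d else d.insert major fcsRec0
  d1.insert major (fcsAUpd pidsets stats (d1.getD major fcsRec0) e)

def fcsALine (p : String × (Int × Int × Int)) : String :=
  "    " ++ p.1 ++ ": " ++ PySem.Int.toStr p.2.1 ++ " KB (total, " ++ PySem.Int.toStr p.2.2.2 ++ " pids), single process peak: " ++ PySem.Int.toStr p.2.2.1 ++ " KB"

def format_category_stats_py (category_peak_sum : List (String × Int)) (category_pid_set : List (String × List String)) (category_stats : Option (List (String × List (String × Int)))) : String :=
  let peaks := PySem.Dict.ofList category_peak_sum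
  let pidsets := PySem.Dict.ofList (category_pid_set.map (fun p => (p.1, PySem.Set.ofList p.2)))
  let stats := category_stats.map (fun l => PySem.Dict.ofList (l.map (fun p => (p.1, PySem.Dict.ofList p.2))))
  if peaks.items = [] then "No category data available.\n"
  else
    let mcs := peaks.items.foldl (fcsAStep pidsets stats) PySem.Dict.empty
    let sortedMajors := PySem.List.sorted mcs.keys (fun x => x) false
    let lines := sortedMajors.foldl (fun acc m =>
      let r := mcs.getD m fcsRec0
      let acc2 := acc ++ ["\n" ++ m ++ ":",
        "  Total Peak Memory: " ++ PySem.Int.toStr r.2.1 ++ " KB (" ++ PySem.Int.toStr (PySem.Set.len r.2.2) ++ " total pids)"]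
      (PySem.List.sorted r.1.items (fun p => p.2.1) true).foldl (fun a p => a ++ [fcsALine p]) acc2) []
    PySem.Str.join "\n" lines

-- ===== PORT B =====
def fcsBSplit (category : String) : String × String :=
  if PySem.Str.isIn ":" category then
    let parts := (PySem.Str.splitMax? category ":" 1).getD []
    (parts.getD 0 "", parts.getD 1 "")
  else (category, "Unknown")

def fcsBIndiv (stats : Option (PySem.Dict String (PySem.Dict String Int))) (category : String) (peak : Int) : Int :=
  match stats with
  | none => peak
  | some st =>
      if st.size != 0 && st.contains category then
        (st.getD category PySem.Dict.empty).getD "individual_peak_memory_kb" peak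
      else peak

def fcsBLine (p : String × (Int × Int × Int)) : String :=
  "    " ++ p.1 ++ ": " ++ PySem.Int.toStr p.2.1 ++ " KB (total, " ++ PySem.Int.toStr p.2.2.2 ++ " pids), single process peak: " ++ PySem.Int.toStr p.2.2.1 ++ " KB"

-- the 'while rest:' selection loop of B; fuel (= initial length) only makes the recursion structural
def fcsBLoop (ps : PySem.Dict String (PySem.Set String)) (st : Option (PySem.Dict String (PySem.Dict String Int))) : Nat → List (String × String × String × Int) → List String → List String
  | 0, _, acc => acc
  | fuel+1, rest, acc =>
    match PySem.List.min? (rest.map (fun e => e.1)) (fun x => x) with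
    | none => acc
    | some m =>
      let block := rest.filter (fun e => e.1 == m)
      let rest' := rest.filter (fun e => e.1 != m)
      -- for _, minor, cat, peak in block: total += peak; pids.update(...); minors[minor] = (...)
      let agg := block.foldl (fun (a : Int × PySem.Set String × PySem.Dict String (Int × Int × Int)) e =>
          (a.1 + e.2.2.2,
           PySem.Set.update a.2.1 (ps.getD e.2.2.1 PySem.Set.empty),
           a.2.2.insert e.2.1 (e.2.2.2, fcsBIndiv st e.2.2.1 e.2.2.2, PySem.Set.len (ps.getD e.2.2.1 PySem.Set.empty))))
        ((0 : Int), PySem.Set.empty, PySem.Dict.empty)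
      let acc2 := acc ++ ["\n" ++ m ++ ":",
        "  Total Peak Memory: " ++ PySem.Int.toStr agg.1 ++ " KB (" ++ PySem.Int.toStr (PySem.Set.len agg.2.1) ++ " total pids)"]
      fcsBLoop ps st fuel rest'
        ((PySem.List.sorted agg.2.2.items (fun p => p.2.1) true).foldl (fun a p => a ++ [fcsBLine p]) acc2)

def format_category_stats_py_alt (category_peak_sum : List (String × Int)) (category_pid_set : List (String × List String)) (category_stats : Option (List (String × List (String × Int)))) : String :=
  let peaks := PySem.Dict.ofList category_peak_sum
  let pidsets := PySem.Dict.ofList (category_pid_set.map (fun p => (p.1, PySem.Set.ofList p.2)))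
  let stats := category_stats.map (fun l => PySem.Dict.ofList (l.map (fun p => (p.1, PySem.Dict.ofList p.2))))
  if peaks.items = [] then "No category data available.\n"
  else
    let entries := peaks.items.foldl (fun acc e =>
      acc ++ [((fcsBSplit e.1).1, (fcsBSplit e.1).2, e.1, e.2)]) []
    PySem.Str.join "\n" (fcsBLoop pidsets stats entries.length entries [])

-- ===== PRECONDITION & SPEC =====
def Spec_format_category_stats_py (category_peak_sum : List (String × Int)) (category_pid_set : List (String × List String)) (category_stats : Option (List (String × List (String × Int)))) (out : String) : Prop := out = format_category_stats_py_alt category_peak_sum category_pid_set category_stats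
instance (category_peak_sum : List (String × Int)) (category_pid_set : List (String × List String)) (category_stats : Option (List (String × List (String × Int)))) (out : String) : Decidable (Spec_format_category_stats_py category_peak_sum category_pid_set category_stats out) := by unfold Spec_format_category_stats_py; infer_instance

-- ===== CLAIM (what is proved, stated in full; the proofs are below) =====
def Claim_equal_format_category_stats_py : Prop := ∀ (category_peak_sum : List (String × Int)) (category_pid_set : List (String × List String)) (category_stats : Option (List (String × List (String × Int)))), Dom_format_category_stats_py category_peak_sum category_pid_set category_stats → Spec_format_category_stats_py category_peak_sum category_pid_set category_stats (format_category_stats_py category_peak_sum category_pid_set category_stats)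

-- ===== LEMMAS AND PROOFS =====

theorem fcsBSplit_eq : fcsBSplit = fcsASplit := rfl

-- B's per-block accumulator (total, pids, minors) as one function of the block
def fcsBAggOf (ps : PySem.Dict String (PySem.Set String)) (st : Option (PySem.Dict String (PySem.Dict String Int))) (l : List (String × String × String × Int)) : Int × PySem.Set String × PySem.Dict String (Int × Int × Int) :=
  l.foldl (fun (a : Int × PySem.Set String × PySem.Dict String (Int × Int × Int)) e =>
      (a.1 + e.2.2.2,
       PySem.Set.update a.2.1 (ps.getD e.2.2.1 PySem.Set.empty),
       a.2.2.insert e.2.1 (e.2.2.2, fcsBIndiv st e.2.2.1 e.2.2.2, PySem.Set.len (ps.getD e.2.2.1 PySem.Set.empty))))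
    ((0 : Int), PySem.Set.empty, PySem.Dict.empty)

-- the block of output lines B emits for major m out of entry list l
def fcsBG (ps : PySem.Dict String (PySem.Set String)) (st : Option (PySem.Dict String (PySem.Dict String Int))) (l : List (String × String × String × Int)) (m : String) : List String :=
  let agg := fcsBAggOf ps st (l.filter (fun e => e.1 == m))
  ["\n" ++ m ++ ":",
   "  Total Peak Memory: " ++ PySem.Int.toStr agg.1 ++ " KB (" ++ PySem.Int.toStr (PySem.Set.len agg.2.1) ++ " total pids)"]
  ++ (PySem.List.sorted agg.2.2.items (fun p => p.2.1) true).map fcsBLine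

-- the per-major block phrased through A's record fold
def fcsG (ps : PySem.Dict String (PySem.Set String)) (st : Option (PySem.Dict String (PySem.Dict String Int))) (items : List (String × Int)) (m : String) : List String :=
  let r := (items.filter (fun e => (fcsASplit e.1).1 == m)).foldl (fcsAUpd ps st) fcsRec0
  ["\n" ++ m ++ ":",
   "  Total Peak Memory: " ++ PySem.Int.toStr r.2.1 ++ " KB (" ++ PySem.Int.toStr (PySem.Set.len r.2.2) ++ " total pids)"]
  ++ (PySem.List.sorted r.1.items (fun p => p.2.1) true).map fcsALine

theorem fcsAStep_eq (ps : PySem.Dict String (PySem.Set String)) (st : Option (PySem.Dict String (PySem.Dict String Int))) (d : PySem.Dict String FcsRec) (e : String × Int) :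
    fcsAStep ps st d e = d.insert (fcsASplit e.1).1 (fcsAUpd ps st (d.getD (fcsASplit e.1).1 fcsRec0) e) := by
  unfold fcsAStep
  by_cases h : d.contains (fcsASplit e.1).1 = true
  · simp [h]
  · simp only [Bool.not_eq_true] at h
    simp [h, PySem.Dict.insert_insert_self, PySem.Dict.getD_insert_self,
      PySem.Dict.getD_of_not_contains _ _ h]

theorem foldA_getD (ps : PySem.Dict String (PySem.Set String)) (st : Option (PySem.Dict String (PySem.Dict String Int))) (l : List (String × Int)) (d : PySem.Dict String FcsRec) (m : String) :
    (l.foldl (fcsAStep ps st) d).getD m fcsRec0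
      = (l.filter (fun e => (fcsASplit e.1).1 == m)).foldl (fcsAUpd ps st) (d.getD m fcsRec0) := by
  induction l generalizing d with
  | nil => rfl
  | cons e t ih =>
    simp only [List.foldl_cons, List.filter_cons, fcsAStep_eq]
    by_cases hm : (fcsASplit e.1).1 = m
    · simp [hm, ih, PySem.Dict.getD_insert]
    · simp [hm, ih, PySem.Dict.getD_insert, Ne.symm hm]

theorem foldA_keys (ps : PySem.Dict String (PySem.Set String)) (st : Option (PySem.Dict String (PySem.Dict String Int))) (l : List (String × Int)) (d : PySem.Dict String FcsRec) :
    (l.foldl (fcsAStep ps st) d).keys = PySem.Set.update d.keys (l.map (fun e => (fcsASplit e.1).1)) := by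
  have h : l.foldl (fcsAStep ps st) d
      = l.foldl (fun d e => d.insert ((fun e : String × Int => (fcsASplit e.1).1) e)
          ((fun (d : PySem.Dict String FcsRec) (e : String × Int) => fcsAUpd ps st (d.getD (fcsASplit e.1).1 fcsRec0) e) d e)) d := by
    congr 1
    funext d e
    exact fcsAStep_eq ps st d e
  rw [h, PySem.Dict.keys_foldl_insert_key]

theorem fcsAUpd_components (ps : PySem.Dict String (PySem.Set String)) (st : Option (PySem.Dict String (PySem.Dict String Int))) (l : List (String × Int)) (r : FcsRec) :
    l.foldl (fcsAUpd ps st) r =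
      (l.foldl (fun d e => d.insert (fcsASplit e.1).2 (e.2, fcsAIndiv st e.1 e.2, PySem.Set.len (ps.getD e.1 PySem.Set.empty))) r.1,
       l.foldl (fun s e => s + e.2) r.2.1,
       l.foldl (fun s e => PySem.Set.update s (ps.getD e.1 PySem.Set.empty)) r.2.2) := by
  induction l generalizing r with
  | nil => rfl
  | cons e t ih => simp [fcsAUpd, ih]

-- B's three-field accumulator splits into three independent folds
theorem fcsBAgg_components (ps : PySem.Dict String (PySem.Set String)) (st : Option (PySem.Dict String (PySem.Dict String Int))) (l : List (String × String × String × Int)) (a : Int × PySem.Set String × PySem.Dict String (Int × Int × Int)) :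
    l.foldl (fun (a : Int × PySem.Set String × PySem.Dict String (Int × Int × Int)) e =>
        (a.1 + e.2.2.2,
         PySem.Set.update a.2.1 (ps.getD e.2.2.1 PySem.Set.empty),
         a.2.2.insert e.2.1 (e.2.2.2, fcsBIndiv st e.2.2.1 e.2.2.2, PySem.Set.len (ps.getD e.2.2.1 PySem.Set.empty)))) a
      = (l.foldl (fun s e => s + e.2.2.2) a.1,
         l.foldl (fun s e => PySem.Set.update s (ps.getD e.2.2.1 PySem.Set.empty)) a.2.1,
         l.foldl (fun d e => d.insert e.2.1 (e.2.2.2, fcsBIndiv st e.2.2.1 e.2.2.2, PySem.Set.len (ps.getD e.2.2.1 PySem.Set.empty))) a.2.2) := by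
  induction l generalizing a with
  | nil => rfl
  | cons e t ih =>
    simp only [List.foldl_cons]
    exact ih _

-- selecting the minimum peels exactly the head off sorted(set(ms))
theorem sorted_ofList_min_cons (ms : List String) (m : String)
    (hm : PySem.List.min? ms (fun x => x) = some m) :
    PySem.List.sorted (PySem.Set.ofList ms) (fun x => x) false
      = m :: PySem.List.sorted (PySem.Set.ofList (ms.filter (fun x => x != m))) (fun x => x) false := by
  have hmem : m ∈ ms := PySem.List.min?_mem hm
  have hmin : ∀ y ∈ ms, m ≤ y := PySem.List.min?_isMin hm
  set T := PySem.List.sorted (PySem.Set.ofList (ms.filter (fun x => x != m))) (fun x => x) false with hT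
  have hTmem : ∀ x, x ∈ T ↔ (x ∈ ms ∧ x ≠ m) := by
    intro x
    rw [hT, PySem.List.mem_sorted, PySem.Set.mem_ofList, List.mem_filter]
    simp
  have hTlt : T.Pairwise (· < ·) := by
    rw [hT]; exact PySem.List.sorted_ofList_pairwise_lt _
  apply PySem.List.sorted_id_eq_of_perm_of_pairwise
  · rw [List.perm_ext_iff_of_nodup]
    · intro a
      rw [List.mem_cons, PySem.Set.mem_ofList]
      constructor
      · rintro (rfl | ha)
        · exact hmem
        · exact ((hTmem a).mp ha).1
      · intro ha
        by_cases h : a = m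
        · exact Or.inl h
        · exact Or.inr ((hTmem a).mpr ⟨ha, h⟩)
    · constructor
      · intro x hx
        exact ((hTmem x).mp hx).2.symm
      · exact hTlt.imp ne_of_lt
    · exact PySem.Set.nodup_ofList _
  · constructor
    · intro x hx
      rcases (hTmem x).mp hx with ⟨hxm, hxne⟩
      exact (lt_of_le_of_ne (hmin x hxm) (Ne.symm hxne)).le
    · exact hTlt.imp le_of_lt

-- the selection loop emits, in sorted-major order, one block per distinct major
theorem fcsBLoop_eq (ps : PySem.Dict String (PySem.Set String)) (st : Option (PySem.Dict String (PySem.Dict String Int))) :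
    ∀ (fuel : Nat) (l : List (String × String × String × Int)) (acc : List String), l.length ≤ fuel →
    fcsBLoop ps st fuel l acc
      = acc ++ (PySem.List.sorted (PySem.Set.ofList (l.map (fun e => e.1))) (fun x => x) false).flatMap (fcsBG ps st l) := by
  intro fuel
  induction fuel with
  | zero =>
    intro l acc hl
    have hnil : l = [] := List.length_eq_zero_iff.mp (Nat.le_zero.mp hl)
    subst hnil
    have h1 : fcsBLoop ps st 0 [] acc = acc := rfl
    have h2 : PySem.List.sorted (PySem.Set.ofList (([] : List (String × String × String × Int)).map (fun e => e.1))) (fun x => x) false = [] := rfl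
    rw [h1, h2, List.flatMap_nil, List.append_nil]
  | succ fuel ih =>
    intro l acc hl
    match hmin : PySem.List.min? (l.map (fun e => e.1)) (fun x => x) with
    | none =>
      have hnil : l = [] := List.map_eq_nil_iff.mp ((PySem.List.min?_eq_none_iff (l.map (fun e => e.1)) (fun x => x)).mp hmin)
      subst hnil
      have h1 : fcsBLoop ps st (fuel + 1) [] acc = acc := rfl
      have h2 : PySem.List.sorted (PySem.Set.ofList (([] : List (String × String × String × Int)).map (fun e => e.1))) (fun x => x) false = [] := rfl
      rw [h1, h2, List.flatMap_nil, List.append_nil]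
    | some m =>
      have hmemmap : m ∈ l.map (fun e => e.1) := PySem.List.min?_mem hmin
      have hlen : (l.filter (fun e => e.1 != m)).length < l.length := by
        rw [List.length_filter_lt_length_iff_exists]
        rcases List.mem_map.mp hmemmap with ⟨e, he, hem⟩
        exact ⟨e, he, by simp [hem]⟩
      have hstep : fcsBLoop ps st (fuel + 1) l acc
          = fcsBLoop ps st fuel (l.filter (fun e => e.1 != m))
              ((PySem.List.sorted (fcsBAggOf ps st (l.filter (fun e => e.1 == m))).2.2.items (fun p => p.2.1) true).foldl
                (fun a p => a ++ [fcsBLine p])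
                (acc ++ ["\n" ++ m ++ ":",
                  "  Total Peak Memory: " ++ PySem.Int.toStr (fcsBAggOf ps st (l.filter (fun e => e.1 == m))).1 ++ " KB ("
                    ++ PySem.Int.toStr (PySem.Set.len (fcsBAggOf ps st (l.filter (fun e => e.1 == m))).2.1) ++ " total pids)"])) := by
        simp only [fcsBLoop, hmin]
        rfl
      rw [hstep, ih _ _ (by omega), PySem.List.foldl_append_singleton_eq_map]
      rw [sorted_ofList_min_cons _ m hmin, List.flatMap_cons]
      have hmapf : (l.map (fun e => e.1)).filter (fun x => x != m) = (l.filter (fun e => e.1 != m)).map (fun e => e.1) := by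
        rw [List.filter_map]
        rfl
      rw [hmapf]
      have hcongr : ((PySem.List.sorted (PySem.Set.ofList ((l.filter (fun e => e.1 != m)).map (fun e => e.1))) (fun x => x) false).flatMap
            (fcsBG ps st (l.filter (fun e => e.1 != m))))
          = ((PySem.List.sorted (PySem.Set.ofList ((l.filter (fun e => e.1 != m)).map (fun e => e.1))) (fun x => x) false).flatMap
            (fcsBG ps st l)) := by
        apply List.flatMap_congr
        intro m' hm'
        have hne : m' ≠ m := by
          rw [PySem.List.mem_sorted, PySem.Set.mem_ofList, List.mem_map] at hm'
          rcases hm' with ⟨e, he, rfl⟩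
          have := (List.mem_filter.mp he).2
          simpa using this
        have hff : (l.filter (fun e => e.1 != m)).filter (fun e => e.1 == m') = l.filter (fun e => e.1 == m') := by
          rw [List.filter_filter]
          apply List.filter_congr
          intro e _
          by_cases h : e.1 = m'
          · simp [h, hne]
          · simp [h]
        unfold fcsBG
        rw [hff]
      rw [hcongr]
      unfold fcsBG
      simp [List.append_assoc, fcsBAggOf]

-- ===== VERDICT (by name: the statement is the Claim_ definition above) =====
theorem format_category_stats_py_spec : Claim_equal_format_category_stats_py := by
  intro cps cpid cstats _
  unfold Spec_format_category_stats_py format_category_stats_py format_category_stats_py_alt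
  simp only [fcsBSplit_eq]
  set peaks := PySem.Dict.ofList cps with hpeaks
  set ps := PySem.Dict.ofList (cpid.map (fun p => (p.1, PySem.Set.ofList p.2))) with hps
  set st := cstats.map (fun l => PySem.Dict.ofList (l.map (fun p => (p.1, PySem.Dict.ofList p.2)))) with hst
  by_cases hemp : peaks.items = []
  · simp [hemp]
  · rw [if_neg hemp, if_neg hemp]
    rw [PySem.List.foldl_append_singleton_eq_map (fun e : String × Int => ((fcsASplit e.1).1, (fcsASplit e.1).2, e.1, e.2)) peaks.items []]
    rw [List.nil_append]
    rw [fcsBLoop_eq ps st _ _ [] (by simp)]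
    rw [List.nil_append, List.map_map]
    simp only [Function.comp_def]
    rw [foldA_keys]
    have hkeys : (PySem.Dict.empty : PySem.Dict String FcsRec).keys = [] := rfl
    rw [hkeys, PySem.Set.update_nil_left]
    apply congrArg (PySem.Str.join "\n")
    have hA : ∀ (S : List String) (acc : List String),
        S.foldl (fun acc m =>
          let r := (peaks.items.foldl (fcsAStep ps st) PySem.Dict.empty).getD m fcsRec0
          let acc2 := acc ++ ["\n" ++ m ++ ":",
            "  Total Peak Memory: " ++ PySem.Int.toStr r.2.1 ++ " KB (" ++ PySem.Int.toStr (PySem.Set.len r.2.2) ++ " total pids)"]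
          (PySem.List.sorted r.1.items (fun p => p.2.1) true).foldl (fun a p => a ++ [fcsALine p]) acc2) acc
        = acc ++ S.flatMap (fcsG ps st peaks.items) := by
      intro S
      induction S with
      | nil => intro acc; simp
      | cons m t iht =>
        intro acc
        simp only [List.foldl_cons, List.flatMap_cons]
        rw [PySem.List.foldl_append_singleton_eq_map, iht]
        have hg : fcsG ps st peaks.items m
            = ["\n" ++ m ++ ":",
               "  Total Peak Memory: " ++ PySem.Int.toStr (((peaks.items.foldl (fcsAStep ps st) PySem.Dict.empty).getD m fcsRec0)).2.1 ++ " KB (" ++ PySem.Int.toStr (PySem.Set.len (((peaks.items.foldl (fcsAStep ps st) PySem.Dict.empty).getD m fcsRec0)).2.2) ++ " total pids)"]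
              ++ (PySem.List.sorted (((peaks.items.foldl (fcsAStep ps st) PySem.Dict.empty).getD m fcsRec0)).1.items (fun p => p.2.1) true).map fcsALine := by
          unfold fcsG
          rw [foldA_getD, PySem.Dict.getD_empty]
        rw [hg]
        simp [List.append_assoc]
    rw [hA]
    rw [List.nil_append]
    apply List.flatMap_congr
    intro m _
    unfold fcsG fcsBG fcsBAggOf
    rw [List.filter_map (f := fun e : String × Int => ((fcsASplit e.1).1, (fcsASplit e.1).2, e.1, e.2))]
    rw [fcsBAgg_components, fcsAUpd_components]
    simp only [List.foldl_map]
    rfl
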